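-- pv_equiv track=rewrite | github.com/Adamsua-lab/Blooms-Taxonomy-Verbs-classification-on-Think-aloud-Protocol-s-Transcripts | batch_transcribe_fw.py | _dedupe_runs
-- ===== SOURCE A (Python) =====
-- def _dedupe_runs(tokens, max_run=3):
--     out = []
--     run = 0
--     prev = None
--     for t in tokens:
--         if prev is not None and t.lower() == prev.lower():
--             run += 1
--         else:
--             run = 1
--         if run <= max_run:
--             out.append(t)
--         prev = t
--     return out
-- ===== SOURCE B (Python) =====
-- from itertools import groupby, islice
--
-- def _dedupe_runs(tokens, max_run=3):
--     out = []
--     for _, group in groupby(tokens, key=lambda t: t.lower()):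
--         out.extend(islice(group, max(0, max_run)))
--     return out
-- ===== Notes on version B (the rewrite author's own statement) =====
-- stated objective: idiomatic
-- what changed: Replaces the hand-maintained run counter and prev variable with itertools.groupby over the case-folded key, taking the first max(0,max_run) elements of each maximal run via islice.
import Mathlib
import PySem

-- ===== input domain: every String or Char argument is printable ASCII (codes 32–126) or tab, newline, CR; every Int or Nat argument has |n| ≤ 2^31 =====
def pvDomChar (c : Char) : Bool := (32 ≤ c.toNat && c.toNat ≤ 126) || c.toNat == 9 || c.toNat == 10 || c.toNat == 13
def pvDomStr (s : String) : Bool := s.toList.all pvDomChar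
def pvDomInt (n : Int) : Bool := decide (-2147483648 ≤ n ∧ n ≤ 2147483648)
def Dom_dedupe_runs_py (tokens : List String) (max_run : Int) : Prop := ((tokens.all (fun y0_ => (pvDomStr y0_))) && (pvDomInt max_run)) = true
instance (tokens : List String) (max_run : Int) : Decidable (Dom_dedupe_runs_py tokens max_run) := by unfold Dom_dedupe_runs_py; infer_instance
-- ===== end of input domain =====

-- B groups the maximal case-insensitive runs (itertools.groupby) and keeps the first max(0,max_run) of each, instead of A's hand-maintained run counter and prev variable; same cost, more idiomatic.

-- ===== PORT A =====
-- A's loop body on the state (out, run, prev)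
def pvStepA (max_run : Int) (st : List String × Int × Option String) (t : String) :
    List String × Int × Option String :=
  let run : Int := match st.2.2 with
    | some p => if PySem.Str.lower t = PySem.Str.lower p then st.2.1 + 1 else 1
    | none => 1
  ((if run ≤ max_run then st.1 ++ [t] else st.1), run, some t)

def dedupe_runs_py (tokens : List String) (max_run : Int) : List String :=
  (tokens.foldl (pvStepA max_run) ([], 0, none)).1

-- ===== PORT B =====
-- groupby's splitting off of the leading maximal run with key t.lower()
def pvSpanLower (key : String) : List String → List String × List String
  | [] => ([], [])
  | t :: ts =>
    if PySem.Str.lower t = key then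
      let r := pvSpanLower key ts
      (t :: r.1, r.2)
    else ([], t :: ts)

theorem pvSpanLower_rest_le (key : String) (ts : List String) :
    (pvSpanLower key ts).2.length ≤ ts.length := by
  induction ts with
  | nil => simp [pvSpanLower]
  | cons t ts ih =>
    simp only [pvSpanLower]
    split
    · simpa using Nat.le_succ_of_le ih
    · simp

-- itertools.groupby(tokens, key=lambda t: t.lower()), as the list of groups
def pvGroupsLower : List String → List (List String)
  | [] => []
  | t :: ts =>
    let r := pvSpanLower (PySem.Str.lower t) ts
    (t :: r.1) :: pvGroupsLower r.2
termination_by l => l.length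
decreasing_by
  simpa [List.length_cons] using Nat.lt_succ_of_le (pvSpanLower_rest_le (PySem.Str.lower t) ts)

-- out.extend(islice(group, max(0, max_run)))
def dedupe_runs_py_alt (tokens : List String) (max_run : Int) : List String :=
  (pvGroupsLower tokens).foldl (fun out g => out ++ g.take (max 0 max_run).toNat) []

-- ===== PRECONDITION & SPEC =====
def Spec_dedupe_runs_py (tokens : List String) (max_run : Int) (out : List String) : Prop := out = dedupe_runs_py_alt tokens max_run
instance (tokens : List String) (max_run : Int) (out : List String) : Decidable (Spec_dedupe_runs_py tokens max_run out) := by unfold Spec_dedupe_runs_py; infer_instance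

-- ===== CLAIM (what is proved, stated in full; the proofs are below) =====
def Claim_equal_dedupe_runs_py : Prop := ∀ (tokens : List String) (max_run : Int), Dom_dedupe_runs_py tokens max_run → Spec_dedupe_runs_py tokens max_run (dedupe_runs_py tokens max_run)

-- ===== LEMMAS AND PROOFS =====

theorem pvSpanLower_append (key : String) (ts : List String) :
    (pvSpanLower key ts).1 ++ (pvSpanLower key ts).2 = ts := by
  induction ts with
  | nil => simp [pvSpanLower]
  | cons t ts ih =>
    simp only [pvSpanLower]
    split
    · simpa using ih
    · simp

theorem pvSpanLower_mem (key : String) (ts : List String) :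
    ∀ x ∈ (pvSpanLower key ts).1, PySem.Str.lower x = key := by
  induction ts with
  | nil => simp [pvSpanLower]
  | cons t ts ih =>
    simp only [pvSpanLower]
    split
    · rename_i h
      intro x hx
      simp only [List.mem_cons] at hx
      rcases hx with rfl | hx
      · exact h
      · exact ih x hx
    · simp

theorem pvSpanLower_rest_head (key : String) (ts : List String) :
    ∀ u, (pvSpanLower key ts).2.head? = some u → PySem.Str.lower u ≠ key := by
  induction ts with
  | nil => simp [pvSpanLower]
  | cons t ts ih =>
    simp only [pvSpanLower]
    split
    · exact ih
    · rename_i h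
      intro u hu
      simp only [List.head?_cons, Option.some.injEq] at hu
      subst hu
      exact h

theorem pvLower_getLastD (key : String) (g : List String) (p : String)
    (hg : ∀ x ∈ g, PySem.Str.lower x = key) (hp : PySem.Str.lower p = key) :
    PySem.Str.lower (g.getLastD p) = key := by
  cases h : g.getLast? with
  | none => simp [List.getLastD_eq_getLast?, h, hp]
  | some q =>
    have : q ∈ g := List.mem_of_getLast? h
    simp [List.getLastD_eq_getLast?, h, hg q this]

-- processing one maximal run from a state whose prev has the same key
theorem pvFold_group (max_run : Int) (g : List String) (key : String)
    (hg : ∀ x ∈ g, PySem.Str.lower x = key) :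
    ∀ (out : List String) (r : Int) (p : String), PySem.Str.lower p = key →
      g.foldl (pvStepA max_run) (out, r, some p)
        = (out ++ g.take (max_run - r).toNat, r + g.length, some (g.getLastD p)) := by
  induction g with
  | nil => intro out r p _; simp
  | cons x gs ih =>
    intro out r p hp
    have hx : PySem.Str.lower x = key := hg x (List.mem_cons_self ..)
    have hgs : ∀ y ∈ gs, PySem.Str.lower y = key := fun y hy => hg y (List.mem_cons_of_mem _ hy)
    simp only [List.foldl_cons, pvStepA, hx, hp, if_true]
    rw [ih hgs _ (r + 1) x hx]
    refine Prod.ext ?_ (Prod.ext (by simp; ring_nf) (by rw [List.getLastD_cons]))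
    by_cases h1 : r + 1 ≤ max_run
    · have : (max_run - r).toNat = (max_run - (r + 1)).toNat + 1 := by omega
      simp [h1, this, List.take_succ_cons]
    · have h0 : (max_run - r).toNat = 0 := by omega
      have h0' : (max_run - (r + 1)).toNat = 0 := by omega
      simp [h1, h0, h0']

-- processing the whole rest from a fresh state (prev absent or mismatching the next token)
theorem pvFold_fresh (max_run : Int) :
    ∀ (n : ℕ) (ts : List String), ts.length ≤ n →
    ∀ (out : List String) (r : Int) (p? : Option String),
      (∀ p u, p? = some p → ts.head? = some u → PySem.Str.lower p ≠ PySem.Str.lower u) →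
      (ts.foldl (pvStepA max_run) (out, r, p?)).1
        = (pvGroupsLower ts).foldl (fun o g => o ++ g.take (max 0 max_run).toNat) out := by
  intro n
  induction n with
  | zero =>
    intro ts hts out r p? _
    have : ts = [] := List.eq_nil_of_length_eq_zero (Nat.le_zero.mp hts)
    subst this
    simp [pvGroupsLower]
  | succ n ih =>
    intro ts hts out r p? hfresh
    cases ts with
    | nil => simp [pvGroupsLower]
    | cons t ts0 =>
      have hstep : pvStepA max_run (out, r, p?) t
          = ((if (1:Int) ≤ max_run then out ++ [t] else out), 1, some t) := by
        cases p? with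
        | none => simp [pvStepA]
        | some p =>
          have hne : PySem.Str.lower t ≠ PySem.Str.lower p :=
            fun h => hfresh p t rfl rfl h.symm
          simp [pvStepA, hne]
      obtain ⟨g, rest, hspan⟩ : ∃ g rest, pvSpanLower (PySem.Str.lower t) ts0 = (g, rest) :=
        ⟨_, _, rfl⟩
      have hsplit : ts0 = g ++ rest := by
        have h := pvSpanLower_append (PySem.Str.lower t) ts0
        rw [hspan] at h; exact h.symm
      have hgmem : ∀ x ∈ g, PySem.Str.lower x = PySem.Str.lower t := by
        have h := pvSpanLower_mem (PySem.Str.lower t) ts0; rw [hspan] at h; exact h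
      have hresthead : ∀ u, rest.head? = some u → PySem.Str.lower u ≠ PySem.Str.lower t := by
        have h := pvSpanLower_rest_head (PySem.Str.lower t) ts0; rw [hspan] at h; exact h
      have hrestlen : rest.length ≤ n := by
        have h1 : rest.length ≤ ts0.length := by
          simpa [hspan] using pvSpanLower_rest_le (PySem.Str.lower t) ts0
        simp only [List.length_cons] at hts
        omega
      have hlast : PySem.Str.lower (g.getLastD t) = PySem.Str.lower t :=
        pvLower_getLastD (PySem.Str.lower t) g t hgmem rfl
      have hgroups : pvGroupsLower (t :: ts0) = (t :: g) :: pvGroupsLower rest := by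
        rw [pvGroupsLower]
        simp only [hspan]
      rw [List.foldl_cons, hstep, hsplit, List.foldl_append,
        pvFold_group max_run g (PySem.Str.lower t) hgmem _ 1 t rfl,
        ih rest hrestlen _ _ _ (by
          intro p u hp hu h
          cases hp
          exact hresthead u hu (h ▸ hlast))]
      rw [hsplit] at hgroups
      rw [hgroups, List.foldl_cons]
      congr 1
      by_cases h1 : (1:Int) ≤ max_run
      · have hK : (max 0 max_run).toNat = (max_run - 1).toNat + 1 := by omega
        simp [h1, hK, List.take_succ_cons]
      · have hK : (max 0 max_run).toNat = 0 := by omega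
        have hK' : (max_run - 1).toNat = 0 := by omega
        simp [h1, hK, hK']

-- ===== VERDICT (by name: the statement is the Claim_ definition above) =====
theorem dedupe_runs_py_spec : Claim_equal_dedupe_runs_py := by
  intro tokens max_run _
  unfold Spec_dedupe_runs_py dedupe_runs_py dedupe_runs_py_alt
  exact pvFold_fresh max_run tokens.length tokens le_rfl [] 0 none (by simp)
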